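-- pv_equiv track=rewrite | github.com/hyeinhyun/multimodal_highlight | eng_analysis_rev2.py | sum_temp
-- ===== SOURCE A (Python) =====
-- def sum_temp(tempLine):
--     tempList = []
--     index = 0
--     for temp in tempLine:
--         if len(tempList)==0:
--             tempList.append(temp)
--         else:
--             if tempList[index]['time'] == temp['time']:
--                 tempList[index]['text'] = tempList[index]['text']+temp['text']
--             else:
--                 index = index+1
--                 tempList.append(temp)
--     return tempList
-- ===== SOURCE B (Python) =====
-- def sum_temp(tempLine):
--     n = len(tempLine)
--     # pass 1: start index of every maximal run of consecutive equal-time entries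
--     starts = [i for i in range(n) if i == 0 or tempLine[i]['time'] != tempLine[i - 1]['time']]
--     # pass 2: emit each run's lead dict, joining the run's texts into it when the run has >1 entry
--     result = []
--     for s, e in zip(starts, starts[1:] + [n]):
--         first = tempLine[s]
--         if e - s > 1:
--             first['text'] = ''.join(d['text'] for d in tempLine[s:e])
--         result.append(first)
--     return result
-- ===== Notes on version B (the rewrite author's own statement) =====
-- stated objective: alternative
-- what changed: B is a staged two-pass algorithm: it first computes the start index of every maximal run of consecutive equal-'time' entries, then emits each run's lead dict, joining the whole run's texts with one slice + ''.join, instead of A's single incremental append-or-merge accumulator loop with a tracked index.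
import Mathlib
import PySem

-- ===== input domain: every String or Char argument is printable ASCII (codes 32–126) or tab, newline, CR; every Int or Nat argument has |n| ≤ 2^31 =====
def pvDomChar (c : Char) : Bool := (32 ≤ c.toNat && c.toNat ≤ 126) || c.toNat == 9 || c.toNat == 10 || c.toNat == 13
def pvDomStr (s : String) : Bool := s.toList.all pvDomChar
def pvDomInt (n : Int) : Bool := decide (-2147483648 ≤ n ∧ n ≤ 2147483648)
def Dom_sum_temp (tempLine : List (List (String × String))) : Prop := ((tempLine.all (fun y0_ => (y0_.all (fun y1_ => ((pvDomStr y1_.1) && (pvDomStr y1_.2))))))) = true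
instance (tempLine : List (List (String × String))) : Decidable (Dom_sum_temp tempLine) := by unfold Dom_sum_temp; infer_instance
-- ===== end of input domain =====

-- One line: B stages the work — first compute the start index of every maximal equal-'time' run,
-- then emit each run by slicing and joining its texts — instead of A's incremental append-or-merge
-- accumulator (alternative decomposition); equivalence is about the RETURN value (both Pythons
-- mutate the lead dict of each multi-entry run in place).

-- d[k] lookup, first match; "" is only returned where Python raises KeyError (excluded by Pre_)
def dget (d : List (String × String)) (k : String) : String :=
  ((d.find? (fun p => p.1 == k)).map (·.2)).getD ""

-- whether key k is present
def dhas (d : List (String × String)) (k : String) : Bool :=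
  (d.find? (fun p => p.1 == k)).isSome

-- Python dict assignment d[k] = v: overwrite first occurrence in place, else append
def dset (d : List (String × String)) (k v : String) : List (String × String) :=
  match d with
  | [] => [(k, v)]
  | (k', v') :: rest => if k' == k then (k', v) :: rest else (k', v') :: dset rest k v

-- ===== PORT A =====
-- tempList[index] = x: exact for the in-range indices A uses (index is always len(tempList)-1)
def pySetAt (xs : List (List (String × String))) (i : Int) (v : List (String × String)) :
    List (List (String × String)) :=
  if 0 ≤ i ∧ i < xs.length then xs.set i.toNat v else xs

def aStep (st : List (List (String × String)) × Int) (temp : List (String × String)) :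
    List (List (String × String)) × Int :=
  let tempList := st.1
  let index := st.2
  if tempList.length = 0 then (tempList ++ [temp], index)
  else
    let cur := (PySem.List.pyGet? tempList index).getD []
    if dget cur "time" = dget temp "time" then
      (pySetAt tempList index (dset cur "text" (dget cur "text" ++ dget temp "text")), index)
    else
      (tempList ++ [temp], index + 1)

def sum_temp (tempLine : List (List (String × String))) : List (List (String × String)) :=
  (tempLine.foldl aStep ([], 0)).1

-- ===== PORT B =====
-- starts = [i for i in range(n) if i == 0 or tempLine[i]['time'] != tempLine[i-1]['time']]
-- (tempLine[i] is exact as pyGet?.getD []: every i drawn from range(n) — and i-1 for i ≥ 1 — is in range)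
def bStarts (tempLine : List (List (String × String))) : List Int :=
  (PySem.List.pyRange 0 tempLine.length 1).filter (fun i =>
    i == 0 || !(dget ((PySem.List.pyGet? tempLine i).getD []) "time"
                == dget ((PySem.List.pyGet? tempLine (i - 1)).getD []) "time"))

-- for s, e in zip(starts, starts[1:] + [n]): first = tempLine[s];
--   if e - s > 1: first['text'] = ''.join(d['text'] for d in tempLine[s:e]);  result.append(first)
def sum_temp_alt (tempLine : List (List (String × String))) : List (List (String × String)) :=
  let n : Int := tempLine.length
  let starts := bStarts tempLine
  (starts.zip (PySem.List.slice starts (some 1) none ++ [n])).foldl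
    (fun result se =>
      let first := (PySem.List.pyGet? tempLine se.1).getD []
      let first :=
        if 1 < se.2 - se.1 then
          dset first "text"
            (String.join ((PySem.List.slice tempLine (some se.1) (some se.2)).map
              (fun d => dget d "text")))
        else first
      result ++ [first]) []

-- ===== PRECONDITION & SPEC =====
-- Pre_ excludes exactly the inputs on which Python A raises KeyError: a list of ≥ 2 entries where
-- some entry lacks 'time', or where two consecutive equal-time entries do not both carry 'text'.
def Pre_sum_temp (tempLine : List (List (String × String))) : Prop :=
  tempLine.length ≤ 1 ∨
  ((tempLine.all (fun d => dhas d "time")) = true ∧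
   ((tempLine.zip tempLine.tail).all (fun p =>
     !(dget p.1 "time" == dget p.2 "time") || (dhas p.1 "text" && dhas p.2 "text"))) = true)

instance (tempLine : List (List (String × String))) : Decidable (Pre_sum_temp tempLine) := by
  unfold Pre_sum_temp; infer_instance

def pvWitness_sum_temp : (List (List (String × String))) :=
  [[("time", "1"), ("text", "a")], [("time", "1"), ("text", "b")], [("time", "2"), ("text", "c")]]

def Spec_sum_temp (tempLine : List (List (String × String))) (out : List (List (String × String))) : Prop := out = sum_temp_alt tempLine
instance (tempLine : List (List (String × String))) (out : List (List (String × String))) : Decidable (Spec_sum_temp tempLine out) := by unfold Spec_sum_temp; infer_instance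

-- ===== CLAIM (what is proved, stated in full; the proofs are below) =====
def Claim_equal_sum_temp : Prop := ∀ (tempLine : List (List (String × String))), Dom_sum_temp tempLine → Pre_sum_temp tempLine → Spec_sum_temp tempLine (sum_temp tempLine)

-- ===== LEMMAS AND PROOFS =====

-- proof-side normal form: recursion over maximal runs, folding each run into its lead dict
def mergeText (a b : List (String × String)) : List (String × String) :=
  dset a "text" (dget a "text" ++ dget b "text")

def runsMerge (tempLine : List (List (String × String))) : List (List (String × String)) :=
  match tempLine with
  | [] => []
  | d :: rest =>
    let t := dget d "time"
    ((rest.takeWhile (fun e => dget e "time" == t)).foldl mergeText d) ::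
      runsMerge (rest.dropWhile (fun e => dget e "time" == t))
termination_by tempLine.length
decreasing_by
  simpa using Nat.lt_succ_of_le (List.length_dropWhile_le _ _)

-- dset at key "text" does not change the "time" lookup
theorem find?_dset_text (d : List (String × String)) (v : String) :
    List.find? (fun p => p.1 == "time") (dset d "text" v)
      = List.find? (fun p => p.1 == "time") d := by
  induction d with
  | nil => simp [dset]
  | cons p rest ih =>
    obtain ⟨k', v'⟩ := p
    by_cases h : k' = "text"
    · subst h
      simp [dset, List.find?]
    · simp only [dset, beq_iff_eq, h, if_false]
      by_cases h2 : k' = "time"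
      · subst h2; simp [List.find?]
      · simp [List.find?, ih]

theorem dget_mergeText_time (a b : List (String × String)) :
    dget (mergeText a b) "time" = dget a "time" := by
  unfold mergeText dget
  rw [find?_dset_text]

theorem dget_dset_self (d : List (String × String)) (k v : String) :
    dget (dset d k v) k = v := by
  induction d with
  | nil => simp [dset, dget]
  | cons p rest ih =>
    obtain ⟨k', v'⟩ := p
    by_cases h : k' = k
    · subst h; simp [dset, dget]
    · simp [dset, dget, h] at ih ⊢
      simpa [dget] using ih

theorem dset_dset (d : List (String × String)) (k v w : String) :
    dset (dset d k v) k w = dset d k w := by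
  induction d with
  | nil => simp [dset]
  | cons p rest ih =>
    obtain ⟨k', v'⟩ := p
    by_cases h : k' = k
    · subst h; simp [dset]
    · simp [dset, h, ih]

-- folding a run's texts into the lead = one assignment of the concatenated text
theorem foldl_mergeText (r : List (List (String × String))) :
    ∀ d, r.foldl mergeText d =
      if r = [] then d
      else dset d "text" (((r.map (fun e => dget e "text")).foldl (· ++ ·) (dget d "text"))) := by
  induction r with
  | nil => intro d; simp
  | cons b r' ih =>
    intro d
    rw [List.foldl_cons, ih]
    by_cases h : r' = []
    · simp [h, mergeText]
    · simp only [h, if_false, reduceCtorEq]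
      rw [show mergeText d b = dset d "text" (dget d "text" ++ dget b "text") from rfl]
      rw [dset_dset, dget_dset_self]
      simp

theorem pyGet?_last (done : List (List (String × String))) (cur : List (String × String)) :
    (PySem.List.pyGet? (done ++ [cur]) (done.length : Int)).getD [] = cur := by
  have h : PySem.List.pyGet? (done ++ [cur]) ((done.length : Nat) : Int)
      = (done ++ [cur])[(done.length : Nat)]? := PySem.List.pyGet?_natCast _ _
  rw [h]
  simp

theorem pySetAt_last (done : List (List (String × String))) (cur v : List (String × String)) :
    pySetAt (done ++ [cur]) (done.length : Int) v = done ++ [v] := by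
  unfold pySetAt
  rw [if_pos (by constructor <;> simp)]
  simp

-- A-side invariant: running A's loop from state (done ++ [cur], len done) over rest produces
-- done followed by runsMerge (cur :: rest)
theorem foldA_eq (rest : List (List (String × String))) :
    ∀ (done : List (List (String × String))) (cur : List (String × String)),
    (rest.foldl aStep (done ++ [cur], (done.length : Int))).1
      = done ++ runsMerge (cur :: rest) := by
  induction rest with
  | nil =>
    intro done cur
    simp [runsMerge]
  | cons temp rest' ih =>
    intro done cur
    rw [List.foldl_cons]
    have hstep : aStep (done ++ [cur], (done.length : Int)) temp =
        if dget cur "time" = dget temp "time" then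
          (done ++ [mergeText cur temp], (done.length : Int))
        else
          (done ++ [cur] ++ [temp], (done.length : Int) + 1) := by
      unfold aStep
      rw [if_neg (by simp)]
      simp only [pyGet?_last done cur]
      split_ifs with h
      · rw [pySetAt_last]; rfl
      · rfl
    rw [hstep]
    by_cases h : dget cur "time" = dget temp "time"
    · rw [if_pos h, ih done (mergeText cur temp)]
      congr 1
      conv_rhs => rw [runsMerge]
      rw [runsMerge]
      simp only [List.takeWhile_cons, List.dropWhile_cons, dget_mergeText_time,
        beq_iff_eq, h.symm, if_true, List.foldl_cons]
    · rw [if_neg h]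
      have hlen : ((done.length : Int) + 1) = (((done ++ [cur]).length : Nat) : Int) := by
        simp
      rw [hlen, ih (done ++ [cur]) temp]
      conv_rhs => rw [runsMerge]
      have h' : ¬ dget temp "time" = dget cur "time" := fun hne => h hne.symm
      simp [h']

theorem sum_temp_eq_runsMerge (tempLine : List (List (String × String))) :
    sum_temp tempLine = runsMerge tempLine := by
  cases tempLine with
  | nil => simp [sum_temp, runsMerge]
  | cons d rest =>
    unfold sum_temp
    rw [List.foldl_cons]
    have h0 : aStep ([], 0) d = ([] ++ [d], ((List.length ([] : List (List (String × String))) : Nat) : Int)) := by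
      unfold aStep; simp
    rw [h0, foldA_eq rest [] d]
    simp

-- ---- B side: characterise the start indices, then induct over runs ----

-- B's start condition, at a Nat index (the i==0 disjunct guards the i-1 lookup)
def cNat (l : List (List (String × String))) (i : Nat) : Bool :=
  i == 0 || !(dget (l[i]?.getD []) "time" == dget (l[i-1]?.getD []) "time")

def sNat (l : List (List (String × String))) : List Nat :=
  (List.range l.length).filter (cNat l)

-- the emitted dict for one (start, stop) pair of B's second pass
def emitB (l : List (List (String × String))) (se : Int × Int) : List (String × String) :=
  let first := (PySem.List.pyGet? l se.1).getD []
  if 1 < se.2 - se.1 then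
    dset first "text"
      (String.join ((PySem.List.slice l (some se.1) (some se.2)).map (fun d => dget d "text")))
  else first

theorem bStarts_eq (l : List (List (String × String))) :
    bStarts l = (sNat l).map Nat.cast := by
  unfold bStarts sNat
  rw [show PySem.List.pyRange 0 (l.length : Int) 1 = (List.range l.length).map Nat.cast from by
    rw [PySem.List.pyRange_one]; simp only [Int.sub_zero, Int.toNat_natCast, zero_add]]
  rw [List.filter_map]
  congr 1
  apply List.filter_congr
  intro i _
  cases i with
  | zero => simp [cNat]
  | succ j =>
    have h1 : ((j+1 : Nat) : Int) - 1 = ((j : Nat) : Int) := by push_cast; ring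
    have h0 : (((j+1 : Nat) : Int) == 0) = false := by rw [beq_eq_false_iff_ne]; omega
    simp only [Function.comp, h1, h0, PySem.List.pyGet?_natCast, cNat, Bool.false_or]
    simp

-- every entry of d :: r has d's time
theorem timeAt (d : List (String × String)) (r : List (List (String × String)))
    (hr : ∀ e ∈ r, dget e "time" = dget d "time") :
    ∀ i, i < r.length + 1 → dget ((d :: r)[i]?.getD []) "time" = dget d "time" := by
  intro i hi
  cases i with
  | zero => simp
  | succ j =>
    have hj : j < r.length := by omega
    simp only [List.getElem?_cons_succ, List.getElem?_eq_getElem hj, Option.getD_some]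
    exact hr _ (List.getElem_mem hj)

theorem sNat_cons (d : List (String × String)) (r t : List (List (String × String)))
    (hr : ∀ e ∈ r, dget e "time" = dget d "time")
    (ht : ∀ e tt, t = e :: tt → ¬ dget e "time" = dget d "time") :
    sNat ((d :: r) ++ t) = 0 :: (sNat t).map (fun j => j + (r.length + 1)) := by
  set l := (d :: r) ++ t with hl
  set k := r.length + 1 with hk
  have hlen : l.length = k + t.length := by simp [hl, hk]; omega
  unfold sNat
  rw [hlen, List.range_add, List.filter_append]
  have hklen : (d :: r).length = k := by simp [hk]
  -- part 1: the first k indices contribute exactly [0]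
  have h1 : (List.range k).filter (cNat l) = [0] := by
    rw [List.filter_congr (q := fun i => i == 0)]
    · rw [hk, List.range_succ_eq_map, List.filter_cons_of_pos (by simp), List.filter_map]
      simp
    · intro i hi
      have hik : i < k := List.mem_range.mp hi
      cases i with
      | zero => simp [cNat]
      | succ j =>
        have hj1 : (l[j+1]?) = (d :: r)[j+1]? := by
          rw [hl, List.getElem?_append_left (by omega)]
        have hj0 : (l[j]?) = (d :: r)[j]? := by
          rw [hl, List.getElem?_append_left (by omega)]
        simp only [cNat, hj1, hj0, Nat.add_sub_cancel]
        rw [timeAt d r hr (j+1) (by omega), timeAt d r hr j (by omega)]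
        simp
  -- part 2: the shifted indices contribute the shifted starts of t
  have hget : ∀ m : Nat, (l[k + m]?) = t[m]? := by
    intro m
    rw [hl, show k + m = (d :: r).length + m from by rw [hklen],
      List.getElem?_append_right (by omega)]
    simp
  rw [h1, List.singleton_append, List.filter_map,
    show (fun j => j + k) = (fun j => k + j) from by funext j; omega]
  congr 2
  apply List.filter_congr
  intro j hj
  have hjt : j < t.length := List.mem_range.mp hj
  cases j with
  | zero =>
    obtain ⟨e, tt, hett⟩ : ∃ e tt, t = e :: tt := by
      cases t with
      | nil => simp at hjt
      | cons e tt => exact ⟨e, tt, rfl⟩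
    have h0 : l[k + 0]? = t[0]? := hget 0
    rw [Nat.add_zero] at h0
    have hprev : l[k - 1]? = (d :: r)[r.length]? := by
      rw [hl, show k - 1 = r.length from by omega, List.getElem?_append_left (by omega)]
    simp only [Function.comp, Nat.add_zero, cNat, h0, hprev]
    rw [timeAt d r hr r.length (by omega)]
    have hne := ht e tt hett
    simp [hett, hne]
  | succ m =>
    simp only [Function.comp, cNat, hget (m+1), show k + (m+1) - 1 = k + m from by omega,
      hget m, Nat.add_sub_cancel]
    have hkm : (k + (m+1) == 0) = false := by simp
    have hm : (m + 1 == 0) = false := by simp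
    rw [hkm, hm]

theorem mem_bStarts (l : List (List (String × String))) (x : Int) (hx : x ∈ bStarts l) :
    ∃ a : Nat, x = (a : Int) ∧ a < l.length := by
  rw [bStarts_eq] at hx
  obtain ⟨a, ha, rfl⟩ := List.mem_map.mp hx
  exact ⟨a, rfl, List.mem_range.mp (List.mem_of_mem_filter ha)⟩

theorem bStarts_ne_nil (l : List (List (String × String))) (h : l ≠ []) :
    ∃ s', bStarts l = 0 :: s' := by
  rw [bStarts_eq]
  cases l with
  | nil => exact absurd rfl h
  | cons d rest =>
    unfold sNat
    rw [show (d :: rest).length = rest.length + 1 from rfl, List.range_succ_eq_map,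
      List.filter_cons_of_pos (by simp [cNat])]
    exact ⟨_, rfl⟩

-- B's program is the map of emitB over the zipped (start, stop) pairs
theorem alt_eq_map (l : List (List (String × String))) :
    sum_temp_alt l
      = ((bStarts l).zip ((bStarts l).tail ++ [(l.length : Int)])).map (emitB l) := by
  unfold sum_temp_alt
  dsimp only
  rw [PySem.List.slice_from_one]
  rw [show (fun (result : List (List (String × String))) (se : Int × Int) =>
        result ++
          [if 1 < se.2 - se.1 then
            dset ((PySem.List.pyGet? l se.1).getD []) "text"
              (String.join ((PySem.List.slice l (some se.1) (some se.2)).map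
                (fun d => dget d "text")))
          else (PySem.List.pyGet? l se.1).getD []])
      = (fun result se => result ++ [emitB l se]) from rfl]
  rw [PySem.List.foldl_append_singleton_eq_map]
  simp


theorem join_cons (x : String) (xs : List String) :
    String.join (x :: xs) = x ++ String.join xs := by
  simp [String.join_eq]

theorem foldl_join (l : List String) : ∀ a, l.foldl (· ++ ·) a = a ++ String.join l := by
  induction l with
  | nil => intro a; simp [String.join_eq]
  | cons x xs ih =>
    intro a
    rw [List.foldl_cons, ih, join_cons, String.append_assoc]

theorem bStarts_cons (d : List (String × String)) (r t : List (List (String × String)))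
    (hr : ∀ e ∈ r, dget e "time" = dget d "time")
    (ht : ∀ e tt, t = e :: tt → ¬ dget e "time" = dget d "time") :
    bStarts ((d :: r) ++ t)
      = 0 :: (bStarts t).map (fun x => x + ((r.length + 1 : Nat) : Int)) := by
  rw [bStarts_eq, sNat_cons d r t hr ht, List.map_cons, bStarts_eq, List.map_map, List.map_map]
  congr 1

-- the pair (0, run length) emits the lead dict with the run's texts folded in
theorem emitB_head (d : List (String × String)) (r t : List (List (String × String))) :
    emitB ((d :: r) ++ t) (0, ((r.length + 1 : Nat) : Int)) = r.foldl mergeText d := by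
  have hget : (PySem.List.pyGet? ((d :: r) ++ t) 0).getD [] = d := by
    rw [List.cons_append, PySem.List.pyGet?_zero_cons]; rfl
  unfold emitB
  dsimp only
  rw [hget, foldl_mergeText]
  by_cases hrn : r = []
  · subst hrn
    rw [if_neg (by norm_num), if_pos rfl]
  · have hlen1 : 1 ≤ r.length := by
      cases r with
      | nil => exact absurd rfl hrn
      | cons b r' => simp
    rw [if_pos (by push_cast; omega), if_neg hrn]
    have hslice : PySem.List.slice ((d :: r) ++ t) (some 0)
        (some ((r.length + 1 : Nat) : Int)) = d :: r := by
      rw [PySem.List.slice_zero_start, PySem.List.slice_to_natCast,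
        show (r.length + 1) = (d :: r).length from by simp]
      exact List.take_left
    rw [hslice, List.map_cons, join_cons, foldl_join]

-- shifting both bounds by the first run's length moves emitB to the tail list
theorem emitB_shift (d : List (String × String)) (r t : List (List (String × String)))
    (α β : Nat) :
    emitB ((d :: r) ++ t)
        ((α : Int) + ((r.length + 1 : Nat) : Int), (β : Int) + ((r.length + 1 : Nat) : Int))
      = emitB t ((α : Int), (β : Int)) := by
  unfold emitB
  dsimp only
  have hk : (d :: r).length = r.length + 1 := by simp
  have e1 : (α : Int) + ((r.length + 1 : Nat) : Int) = (((r.length + 1) + α : Nat) : Int) := by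
    push_cast; ring
  have e2 : (β : Int) + ((r.length + 1 : Nat) : Int) = (((r.length + 1) + β : Nat) : Int) := by
    push_cast; ring
  have hdiff : (((r.length + 1) + β : Nat) : Int) - (((r.length + 1) + α : Nat) : Int)
      = (β : Int) - (α : Int) := by push_cast; ring
  have hget : (PySem.List.pyGet? ((d :: r) ++ t) (((r.length + 1) + α : Nat) : Int)).getD []
      = (PySem.List.pyGet? t ((α : Nat) : Int)).getD [] := by
    rw [PySem.List.pyGet?_natCast, PySem.List.pyGet?_natCast,
      show (r.length + 1) + α = (d :: r).length + α from by rw [hk],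
      List.getElem?_append_right (by omega)]
    simp
  have hslice : PySem.List.slice ((d :: r) ++ t)
        (some (((r.length + 1) + α : Nat) : Int)) (some (((r.length + 1) + β : Nat) : Int))
      = PySem.List.slice t (some ((α : Nat) : Int)) (some ((β : Nat) : Int)) := by
    rw [PySem.List.slice_natCast, PySem.List.slice_natCast,
      show (r.length + 1) + α = (d :: r).length + α from by rw [hk],
      List.drop_length_add_append]
    congr 1
    omega
  rw [e1, e2, hdiff, hget, hslice]

theorem sum_temp_alt_eq_runsMerge (tempLine : List (List (String × String))) :
    sum_temp_alt tempLine = runsMerge tempLine := by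
  induction tempLine using runsMerge.induct with
  | case1 => rw [runsMerge, alt_eq_map]; rfl
  | case2 d rest tm ih =>
    rw [runsMerge]
    have ih' : sum_temp_alt (rest.dropWhile (fun e => dget e "time" == dget d "time"))
        = runsMerge (rest.dropWhile (fun e => dget e "time" == dget d "time")) := ih
    clear ih
    set p : List (String × String) → Bool := fun e => dget e "time" == dget d "time" with hp
    set r := rest.takeWhile p with hrdef
    set t := rest.dropWhile p with htdef
    have hsplit : d :: rest = (d :: r) ++ t := by
      rw [List.cons_append, hrdef, htdef, List.takeWhile_append_dropWhile]
    have hr : ∀ e ∈ r, dget e "time" = dget d "time" := by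
      intro e he
      have h := List.mem_takeWhile_imp he
      rw [hp] at h
      simpa using h
    have ht : ∀ e tt, t = e :: tt → ¬ dget e "time" = dget d "time" := by
      intro e tt hett heq
      have hne : rest.dropWhile p ≠ [] := by rw [← htdef, hett]; simp
      have hfalse := List.head_dropWhile_not p hne
      have hhead : (rest.dropWhile p).head hne = e := by
        have h2 : rest.dropWhile p = e :: tt := by rw [← htdef]; exact hett
        simp [h2]
      rw [hhead, hp] at hfalse
      simp [heq] at hfalse
    rw [alt_eq_map, hsplit, bStarts_cons d r t hr ht]
    have hlen : ((((d :: r) ++ t).length : Nat) : Int)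
        = ((t.length : Nat) : Int) + ((r.length + 1 : Nat) : Int) := by
      simp only [List.length_append, List.length_cons]
      push_cast
      ring
    rw [hlen]
    by_cases htnil : t = []
    · rw [htnil]
      rw [show bStarts ([] : List (List (String × String))) = [] from rfl]
      simp only [List.map_nil, List.tail_cons, List.nil_append, List.zip_cons_cons,
        List.zip_nil_right, List.map_cons, List.map_nil, List.length_nil,
        Nat.cast_zero, zero_add]
      rw [emitB_head]
      conv_rhs => rw [runsMerge]
    · obtain ⟨s', hs'⟩ := bStarts_ne_nil t htnil
      rw [hs']
      simp only [List.map_cons, List.tail_cons, zero_add]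
      have hzip : (((0 : Int) :: ((r.length + 1 : Nat) : Int) :: s'.map (fun x => x + ((r.length + 1 : Nat) : Int))).zip
            ((((r.length + 1 : Nat) : Int) :: s'.map (fun x => x + ((r.length + 1 : Nat) : Int))) ++ [((t.length : Nat) : Int) + ((r.length + 1 : Nat) : Int)]))
          = (0, ((r.length + 1 : Nat) : Int)) :: ((0 :: s').zip (s' ++ [((t.length : Nat) : Int)])).map
              (Prod.map (fun x => x + ((r.length + 1 : Nat) : Int)) (fun x => x + ((r.length + 1 : Nat) : Int))) := by
        rw [List.cons_append, List.zip_cons_cons]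
        congr 1
        rw [show ((r.length + 1 : Nat) : Int) :: s'.map (fun x => x + ((r.length + 1 : Nat) : Int))
              = (0 :: s').map (fun x => x + ((r.length + 1 : Nat) : Int)) from by simp,
          show s'.map (fun x => x + ((r.length + 1 : Nat) : Int)) ++ [((t.length : Nat) : Int) + ((r.length + 1 : Nat) : Int)]
              = (s' ++ [((t.length : Nat) : Int)]).map (fun x => x + ((r.length + 1 : Nat) : Int)) from by simp,
          List.zip_map]
      rw [hzip, List.map_cons, emitB_head d r t, List.map_map]
      congr 1
      rw [← ih', alt_eq_map, hs', List.tail_cons]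
      apply List.map_congr_left
      intro pr hpr
      obtain ⟨a, b⟩ := pr
      have hmem := List.of_mem_zip hpr
      obtain ⟨α, ha⟩ : ∃ α : Nat, a = (α : Int) := by
        obtain ⟨α, hα, _⟩ := mem_bStarts t a (hs' ▸ hmem.1)
        exact ⟨α, hα⟩
      obtain ⟨β, hb⟩ : ∃ β : Nat, b = (β : Int) := by
        rcases List.mem_append.mp hmem.2 with h | h
        · obtain ⟨β, hβ, _⟩ := mem_bStarts t b (hs' ▸ List.mem_cons_of_mem 0 h)
          exact ⟨β, hβ⟩
        · exact ⟨t.length, by simpa using h⟩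
      subst ha hb
      simpa using emitB_shift d r t α β

theorem sum_temp_eq_alt (tempLine : List (List (String × String))) :
    sum_temp tempLine = sum_temp_alt tempLine := by
  rw [sum_temp_eq_runsMerge, sum_temp_alt_eq_runsMerge]

-- ===== VERDICT (by name: the statement is the Claim_ definition above) =====
theorem sum_temp_spec : Claim_equal_sum_temp := by
  intro tempLine _ _
  unfold Spec_sum_temp
  exact sum_temp_eq_alt tempLine
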